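-- pv_equiv track=rewrite | github.com/crmin/sla235-intro-dh | wikis.py | _toc_with_title
-- ===== SOURCE A (Python) =====
-- import string
--
-- def _toc_with_title(md_body: str) -> str:
--     """Table of Contents title에 이어서 목차 리스트가 시작하는 경우에 대한 파싱
--
--     Args:
--         md_body (str): page markdown body
--
--     Returns:
--         str: 목차 문자열 (markdown)
--     """
--     _, after_toc = md_body.split('### Table of Contents')
--     tocs = []
--     toc_start = False  # list가 끝나면 중단하도록 하기 위한 flag
--     for line in after_toc.split('\n'):
--         line = line.strip()
--         if len(line) > 0 and line[0] in ('*', '-', '+') + tuple(string.digits):  # list in markdown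
--             # *, -, +: ul / 0, 1, 2, .., 9: ol
--             tocs.append(line)
--             if not toc_start:
--                 toc_start = True  # list가 시작되면 flag를 True로 변경
--         elif toc_start:  # list가 시작되었는데 지금 읽은 문자열이 list가 아니라면 toc가 종료되었다고 판단
--             break
--     return '\n'.join(tocs).strip()
-- ===== SOURCE B (Python) =====
-- import string
--
-- def _toc_with_title(md_body: str) -> str:
--     _, after_toc = md_body.split('### Table of Contents')
--     lines = [l.strip() for l in after_toc.split('\n')]
--     is_item = lambda l: len(l) > 0 and l[0] in '*-+' + string.digits
--     # phase 1: drop everything before the first list line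
--     while lines and not is_item(lines[0]):
--         lines = lines[1:]
--     # phase 2: collect the consecutive run of list lines
--     run = []
--     while lines and is_item(lines[0]):
--         run.append(lines[0])
--         lines = lines[1:]
--     return '\n'.join(run).strip()
-- ===== Notes on version B (the rewrite author's own statement) =====
-- stated objective: simpler
-- what changed: Replaces the single flag-driven scan (toc_start state machine with break) by two explicit phases: strip all lines once, drop the prefix of non-list lines, then collect the consecutive run of list lines.
import Mathlib
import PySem

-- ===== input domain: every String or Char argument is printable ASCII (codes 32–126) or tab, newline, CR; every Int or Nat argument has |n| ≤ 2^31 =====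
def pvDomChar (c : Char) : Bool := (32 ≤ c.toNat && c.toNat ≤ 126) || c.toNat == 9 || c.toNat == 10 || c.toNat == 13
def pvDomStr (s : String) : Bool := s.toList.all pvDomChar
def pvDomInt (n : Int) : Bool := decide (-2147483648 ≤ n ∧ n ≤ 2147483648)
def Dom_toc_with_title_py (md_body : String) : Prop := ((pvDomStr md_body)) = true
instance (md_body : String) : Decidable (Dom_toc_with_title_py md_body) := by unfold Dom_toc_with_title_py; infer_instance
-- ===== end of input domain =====

-- B replaces A's flag-driven scan-with-break by two explicit phases (drop the
-- non-list prefix, then take the consecutive run of list lines); same cost, simpler.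

-- ===== PORT A =====
-- line[0] in ('*', '-', '+') + tuple(string.digits)  — tuple membership is equality against each element
def tocHeadIsItemA (line : List Char) : Bool :=
  match line with
  | [] => false
  | c :: _ => (['*', '-', '+', '0', '1', '2', '3', '4', '5', '6', '7', '8', '9'] : List Char).contains c

-- the 'for line in after_toc.split('\n')' loop with its toc_start flag and break
def tocLoopA (lines : List (List Char)) (tocs : List (List Char)) (toc_start : Bool) : List (List Char) :=
  match lines with
  | [] => tocs
  | l :: rest =>
    let line := PySem.Chars.strip l
    if tocHeadIsItemA line then
      tocLoopA rest (tocs ++ [line]) true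
    else if toc_start then
      tocs                        -- break
    else
      tocLoopA rest tocs toc_start

def toc_with_title_py (md_body : String) : String :=
  match PySem.Chars.splitOn md_body.toList ("### Table of Contents".toList) with
  | [_, after_toc] =>
      let tocs := tocLoopA (PySem.Chars.splitOn after_toc ['\n']) [] false
      String.ofList (PySem.Chars.strip (PySem.Chars.join ['\n'] tocs))
  | _ => ""   -- Python raises ValueError here (unpacking); excluded by Pre_

-- ===== PORT B =====
-- is_item = lambda l: len(l) > 0 and l[0] in '*-+' + string.digits
def tocIsItemB (l : List Char) : Bool :=
  !l.isEmpty && ("*-+0123456789".toList.contains (l.headD ' '))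

-- phase 1: while lines and not is_item(lines[0]): lines = lines[1:]
def tocDropB (lines : List (List Char)) : List (List Char) :=
  match lines with
  | [] => []
  | l :: rest => if !tocIsItemB l then tocDropB rest else l :: rest

-- phase 2: while lines and is_item(lines[0]): run.append(lines[0]); lines = lines[1:]
def tocTakeB (lines : List (List Char)) (run : List (List Char)) : List (List Char) :=
  match lines with
  | [] => run
  | l :: rest => if tocIsItemB l then tocTakeB rest (run ++ [l]) else run

-- the '_, after_toc = …' unpacking: the second piece of a two-piece split, if any
def tocAfter? (parts : List (List Char)) : Option (List Char) :=
  if parts.length = 2 then parts[1]? else none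

def toc_with_title_py_alt (md_body : String) : String :=
  match tocAfter? (PySem.Chars.splitOn md_body.toList ("### Table of Contents".toList)) with
  | some after_toc =>
      let lines := (PySem.Chars.splitOn after_toc ['\n']).map PySem.Chars.strip
      let run := tocTakeB (tocDropB lines) []
      String.ofList (PySem.Chars.strip (PySem.Chars.join ['\n'] run))
  | none => ""   -- A raises here; value irrelevant under Pre_

-- ===== PRECONDITION & SPEC =====
-- A unpacks md_body.split(marker) into exactly two pieces: it raises ValueError
-- unless the marker occurs exactly once; Pre_ admits exactly those inputs.
def Pre_toc_with_title_py (md_body : String) : Prop :=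
  PySem.Str.count md_body "### Table of Contents" = 1
instance (md_body : String) : Decidable (Pre_toc_with_title_py md_body) := by
  unfold Pre_toc_with_title_py; infer_instance

def pvWitness_toc_with_title_py : String :=
  "intro\n### Table of Contents\ntitle\n* one\n* two\n\ntext"

def Spec_toc_with_title_py (md_body : String) (out : String) : Prop := out = toc_with_title_py_alt md_body
instance (md_body : String) (out : String) : Decidable (Spec_toc_with_title_py md_body out) := by unfold Spec_toc_with_title_py; infer_instance

-- ===== CLAIM (what is proved, stated in full; the proofs are below) =====
def Claim_equal_toc_with_title_py : Prop := ∀ (md_body : String), Dom_toc_with_title_py md_body → Pre_toc_with_title_py md_body → Spec_toc_with_title_py md_body (toc_with_title_py md_body)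

-- ===== LEMMAS AND PROOFS =====

-- the two item tests agree (same membership list)
theorem tocIsItem_eq (l : List Char) : tocIsItemB l = tocHeadIsItemA l := by
  cases l <;> simp [tocIsItemB, tocHeadIsItemA]

-- once the flag is set, A's loop is B's phase 2 over the stripped remainder
theorem tocLoopA_true (lines : List (List Char)) (tocs : List (List Char)) :
    tocLoopA lines tocs true = tocTakeB (lines.map PySem.Chars.strip) tocs := by
  induction lines generalizing tocs with
  | nil => rfl
  | cons l rest ih =>
    simp only [tocLoopA, tocTakeB, List.map_cons, tocIsItem_eq]
    split
    · exact ih _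
    · rfl

-- before the flag is set, A's loop is phase 1 followed by phase 2
theorem tocLoopA_false (lines : List (List Char)) (tocs : List (List Char)) :
    tocLoopA lines tocs false = tocTakeB (tocDropB (lines.map PySem.Chars.strip)) tocs := by
  induction lines generalizing tocs with
  | nil => rfl
  | cons l rest ih =>
    simp only [tocLoopA, tocDropB, List.map_cons, tocIsItem_eq]
    by_cases h : tocHeadIsItemA (PySem.Chars.strip l)
    · simp [h, tocIsItem_eq, tocLoopA_true, tocTakeB]
    · simp [h, ih]

-- ===== VERDICT (by name: the statement is the Claim_ definition above) =====
theorem toc_with_title_py_spec : Claim_equal_toc_with_title_py := by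
  intro md_body _ _
  unfold Spec_toc_with_title_py toc_with_title_py toc_with_title_py_alt
  rcases PySem.Chars.splitOn md_body.toList ("### Table of Contents".toList) with
    _ | ⟨x, _ | ⟨y, _ | ⟨z, rest⟩⟩⟩ <;> simp [tocAfter?, tocLoopA_false]
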